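-- pv_equiv track=rewrite | github.com/rkapur123/assorted_python_projects | project_3/image_shop.py | negate_blue
-- ===== SOURCE A (Python) =====
-- def negate_blue(rowArray, maxColorValue): #loop through the row Array
--     i = 0
--     newRowArray = []
--     for item in rowArray:
--         if((i-2)%3 == 0 or (i-2) == 0):
--             item = ((int(item)-int(maxColorValue)) * -1) # change B color value
--             newRowArray.append(item)
--         else:
--             newRowArray.append(item)
--         i = i +1
--
--     return newRowArray
-- ===== SOURCE B (Python) =====
-- def negate_blue(rowArray, maxColorValue):
--     # One pass in chunks of three: copy R and G, replace B by maxColorValue - B.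
--     out = []
--     n = len(rowArray)
--     k = 0
--     while k + 3 <= n:
--         out.append(rowArray[k])
--         out.append(rowArray[k + 1])
--         out.append(int(maxColorValue) - int(rowArray[k + 2]))
--         k += 3
--     out.extend(rowArray[k:])
--     return out
-- ===== Notes on version B (the rewrite author's own statement) =====
-- stated objective: simpler
-- what changed: B replaces A's per-element counter with modulo test by a single loop over whole RGB triples (append R, G, maxColorValue - B per chunk, then the leftover tail), with no index arithmetic per element.
import Mathlib
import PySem

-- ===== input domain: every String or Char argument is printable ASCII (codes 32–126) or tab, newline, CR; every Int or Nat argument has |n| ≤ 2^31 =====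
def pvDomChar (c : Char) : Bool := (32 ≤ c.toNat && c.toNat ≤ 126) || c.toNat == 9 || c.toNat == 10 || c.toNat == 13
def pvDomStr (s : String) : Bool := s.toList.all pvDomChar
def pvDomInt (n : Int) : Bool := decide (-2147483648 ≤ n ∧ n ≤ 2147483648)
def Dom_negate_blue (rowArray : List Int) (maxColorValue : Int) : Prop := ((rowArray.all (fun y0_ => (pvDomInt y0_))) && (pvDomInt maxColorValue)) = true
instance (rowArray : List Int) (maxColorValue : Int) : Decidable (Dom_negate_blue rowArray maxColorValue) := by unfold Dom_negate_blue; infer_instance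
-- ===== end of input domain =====

-- B rewrites A's per-element counter-and-modulo pass as a loop over whole RGB triples (objective: simpler).

-- ===== PORT A =====
-- one fold step per element: test the counter, append the (possibly negated) item, bump the counter
def negate_blue_step (maxColorValue : Int) (st : Int × List Int) (item : Int) : Int × List Int :=
  if PySem.Int.mod (st.1 - 2) 3 = 0 ∨ st.1 - 2 = 0 then
    (st.1 + 1, st.2 ++ [(item - maxColorValue) * (-1)])
  else
    (st.1 + 1, st.2 ++ [item])

def negate_blue (rowArray : List Int) (maxColorValue : Int) : List Int :=
  (rowArray.foldl (negate_blue_step maxColorValue) (0, [])).2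

-- ===== PORT B =====
-- the while loop of Source B: k ≤ length is maintained; rowArray[k] is in range whenever read (k+3 ≤ n),
-- so List.getD is exact here; rowArray[k:] for 0 ≤ k is List.drop k
def negate_blue_alt_loop (row : List Int) (maxColorValue : Int) (n k : Nat) (out : List Int) : List Int :=
  if k + 3 ≤ n then
    negate_blue_alt_loop row maxColorValue n (k + 3)
      (out ++ [row.getD k 0, row.getD (k + 1) 0, maxColorValue - row.getD (k + 2) 0])
  else
    out ++ row.drop k
  termination_by n - k

def negate_blue_alt (rowArray : List Int) (maxColorValue : Int) : List Int :=
  negate_blue_alt_loop rowArray maxColorValue rowArray.length 0 []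

-- ===== PRECONDITION & SPEC =====
def Spec_negate_blue (rowArray : List Int) (maxColorValue : Int) (out : List Int) : Prop := out = negate_blue_alt rowArray maxColorValue
instance (rowArray : List Int) (maxColorValue : Int) (out : List Int) : Decidable (Spec_negate_blue rowArray maxColorValue out) := by unfold Spec_negate_blue; infer_instance

-- ===== CLAIM (what is proved, stated in full; the proofs are below) =====
def Claim_equal_negate_blue : Prop := ∀ (rowArray : List Int) (maxColorValue : Int), Dom_negate_blue rowArray maxColorValue → Spec_negate_blue rowArray maxColorValue (negate_blue rowArray maxColorValue)

-- ===== LEMMAS AND PROOFS =====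

-- common reference: per-element spec with a Nat position counter
def nbSpec (m : Int) (t : Nat) : List Int → List Int
  | [] => []
  | x :: xs => (if t % 3 = 2 then m - x else x) :: nbSpec m (t + 1) xs

-- chunk-of-three reference (B's shape)
def nbChunk (m : Int) : List Int → List Int
  | r :: g :: b :: rest => r :: g :: (m - b) :: nbChunk m rest
  | rest => rest

theorem nb_cond_iff (t : Nat) :
    (PySem.Int.mod ((t : Int) - 2) 3 = 0 ∨ (t : Int) - 2 = 0) ↔ t % 3 = 2 := by
  rw [PySem.Int.mod_eq_zero_iff_dvd]
  omega

theorem negate_blue_foldl (m : Int) :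
    ∀ (xs : List Int) (t : Nat) (acc : List Int),
      (xs.foldl (negate_blue_step m) ((t : Int), acc)).2 = acc ++ nbSpec m t xs := by
  intro xs
  induction xs with
  | nil => intro t acc; simp [nbSpec]
  | cons x xs ih =>
    intro t acc
    simp only [List.foldl_cons, negate_blue_step, nbSpec]
    by_cases h : t % 3 = 2
    · rw [if_pos ((nb_cond_iff t).mpr h)]
      have : ((t : Int) + 1) = ((t + 1 : Nat) : Int) := by push_cast; ring
      rw [this, ih (t + 1)]
      simp [h]
    · rw [if_neg (fun hc => h ((nb_cond_iff t).mp hc))]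
      have : ((t : Int) + 1) = ((t + 1 : Nat) : Int) := by push_cast; ring
      rw [this, ih (t + 1)]
      simp [h]

theorem nbSpec_eq_nbChunk (m : Int) :
    ∀ (xs : List Int) (t : Nat), t % 3 = 0 → nbSpec m t xs = nbChunk m xs
  | [], t, _ => rfl
  | [x], t, h => by
    simp only [nbSpec, nbChunk]
    rw [if_neg (by omega)]
  | [x, y], t, h => by
    simp only [nbSpec, nbChunk]
    rw [if_neg (by omega), if_neg (by omega)]
  | x :: y :: z :: rest, t, h => by
    simp only [nbSpec, nbChunk]
    rw [if_neg (by omega), if_neg (by omega), if_pos (by omega),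
        nbSpec_eq_nbChunk m rest (t + 1 + 1 + 1) (by omega)]

theorem nbChunk_short (m : Int) (xs : List Int) (h : xs.length < 3) : nbChunk m xs = xs := by
  match xs, h with
  | [], _ => rfl
  | [x], _ => rfl
  | [x, y], _ => rfl

theorem negate_blue_alt_loop_eq (row : List Int) (m : Int) :
    ∀ (d k : Nat) (out : List Int), row.length ≤ k + d →
      negate_blue_alt_loop row m row.length k out = out ++ nbChunk m (row.drop k) := by
  intro d
  induction d with
  | zero =>
    intro k out hk
    rw [negate_blue_alt_loop, if_neg (by omega)]
    have hlen : (row.drop k).length < 3 := by rw [List.length_drop]; omega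
    rw [nbChunk_short m (row.drop k) hlen]
  | succ d ihd =>
    intro k out hk
    rw [negate_blue_alt_loop]
    by_cases h : k + 3 ≤ row.length
    · rw [if_pos h]
      have h0 : k < row.length := by omega
      have h1 : k + 1 < row.length := by omega
      have h2 : k + 2 < row.length := by omega
      have hd : row.drop k = row[k] :: row[k+1] :: row[k+2] :: row.drop (k + 3) := by
        rw [List.drop_eq_getElem_cons h0, List.drop_eq_getElem_cons h1,
            List.drop_eq_getElem_cons h2]
      rw [ihd (k + 3) _ (by omega), hd]
      simp only [nbChunk, List.getD_eq_getElem?_getD, List.getElem?_eq_getElem h0,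
        List.getElem?_eq_getElem h1, List.getElem?_eq_getElem h2, Option.getD_some]
      simp
    · have hlen : (row.drop k).length < 3 := by rw [List.length_drop]; omega
      rw [if_neg h, nbChunk_short m (row.drop k) hlen]

-- ===== VERDICT (by name: the statement is the Claim_ definition above) =====
theorem negate_blue_spec : Claim_equal_negate_blue := by
  intro rowArray maxColorValue _
  unfold Spec_negate_blue negate_blue negate_blue_alt
  have hA := negate_blue_foldl maxColorValue rowArray 0 []
  simp only [Nat.cast_zero] at hA
  rw [hA, negate_blue_alt_loop_eq rowArray maxColorValue rowArray.length 0 [] (by omega),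
      nbSpec_eq_nbChunk maxColorValue rowArray 0 rfl]
  simp
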